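-- pv_equiv track=rewrite | github.com/scooper4711/chronicle2layout | blueprint2layout/detection.py | _group_consecutive_columns
-- ===== SOURCE A (Python) =====
-- LINE_GROUPING_TOLERANCE = 5
--
-- def _group_consecutive_columns(
--     qualifying_columns: list[tuple[int, int, int]],
-- ) -> list[list[tuple[int, int, int]]]:
--     """Group qualifying columns where gaps are within the grouping tolerance.
--
--     Args:
--         qualifying_columns: Sorted list of (col_index, top, bottom) tuples.
--
--     Returns:
--         List of groups, where each group is a list of column tuples.
--     """
--     if not qualifying_columns:
--         return []
--
--     groups: list[list[tuple[int, int, int]]] = []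
--     current_group = [qualifying_columns[0]]
--
--     for col_data in qualifying_columns[1:]:
--         previous_col_idx = current_group[-1][0]
--         current_col_idx = col_data[0]
--
--         if current_col_idx - previous_col_idx <= LINE_GROUPING_TOLERANCE:
--             current_group.append(col_data)
--         else:
--             groups.append(current_group)
--             current_group = [col_data]
--
--     groups.append(current_group)
--     return groups
-- ===== SOURCE B (Python) =====
-- LINE_GROUPING_TOLERANCE = 5
--
--
-- def _group_consecutive_columns(
--     qualifying_columns: list[tuple[int, int, int]],
-- ) -> list[list[tuple[int, int, int]]]:
--     """Group qualifying columns, built back-to-front: walk the columns in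
--     reverse and either prepend the column to the first (leftmost) group or
--     open a new group in front of it."""
--     groups: list[list[tuple[int, int, int]]] = []
--     for col in reversed(qualifying_columns):
--         if groups and groups[0][0][0] - col[0] <= LINE_GROUPING_TOLERANCE:
--             groups[0].insert(0, col)
--         else:
--             groups.insert(0, [col])
--     return groups
-- ===== Notes on version B (the rewrite author's own statement) =====
-- stated objective: alternative
-- what changed: B builds the grouping back-to-front: it walks the list in reverse with a single list of groups, prepending each column to the first group or opening a new first group, instead of A's forward scan that maintains a separate current_group and flushes it on each break.
import Mathlib
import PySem

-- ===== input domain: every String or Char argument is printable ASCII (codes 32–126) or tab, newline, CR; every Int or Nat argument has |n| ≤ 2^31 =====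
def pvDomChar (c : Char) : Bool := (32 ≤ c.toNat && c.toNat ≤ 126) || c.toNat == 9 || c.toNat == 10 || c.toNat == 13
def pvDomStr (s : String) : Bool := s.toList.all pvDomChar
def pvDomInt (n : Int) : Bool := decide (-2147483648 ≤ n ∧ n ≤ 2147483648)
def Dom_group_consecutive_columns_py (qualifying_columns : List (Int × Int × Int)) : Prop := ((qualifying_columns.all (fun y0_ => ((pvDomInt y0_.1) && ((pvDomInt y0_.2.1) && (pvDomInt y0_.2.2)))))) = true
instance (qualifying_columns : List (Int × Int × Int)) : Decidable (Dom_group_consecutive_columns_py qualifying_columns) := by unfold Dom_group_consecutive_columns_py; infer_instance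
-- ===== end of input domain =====

-- B builds the same grouping back-to-front (reverse walk, prepending into the first
-- group) instead of A's forward scan with a separate current_group accumulator;
-- objective: alternative (no speed claim).

-- ===== PORT A =====
-- forward scan; state = (groups, current_group); current_group[-1] via pyGet? (-1)
def group_consecutive_columns_py (qualifying_columns : List (Int × Int × Int)) : List (List (Int × Int × Int)) :=
  match qualifying_columns with
  | [] => []
  | c0 :: rest =>
    let st := rest.foldl
      (fun (st : List (List (Int × Int × Int)) × List (Int × Int × Int)) col_data =>
        -- previous_col_idx = current_group[-1][0]; current_group is never empty,
        -- so pyGet? returns some; getD c0 only discharges the Option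
        let previous_col_idx := ((PySem.List.pyGet? st.2 (-1)).getD c0).1
        let current_col_idx := col_data.1
        if current_col_idx - previous_col_idx ≤ 5 then
          (st.1, st.2 ++ [col_data])
        else
          (st.1 ++ [st.2], [col_data]))
      (([] : List (List (Int × Int × Int))), [c0])
    st.1 ++ [st.2]

-- ===== PORT B =====
-- one step of B's reverse loop: prepend into the first group, or open a new one
def pvAltStep (groups : List (List (Int × Int × Int))) (col : Int × Int × Int) :
    List (List (Int × Int × Int)) :=
  match groups with
  | (h :: g) :: gs =>
      if h.1 - col.1 ≤ 5 then (col :: h :: g) :: gs else [col] :: (h :: g) :: gs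
  | _ => [col] :: groups   -- groups empty (an empty first group never occurs)

def group_consecutive_columns_py_alt (qualifying_columns : List (Int × Int × Int)) : List (List (Int × Int × Int)) :=
  qualifying_columns.reverse.foldl pvAltStep []

-- ===== PRECONDITION & SPEC =====
def Spec_group_consecutive_columns_py (qualifying_columns : List (Int × Int × Int)) (out : List (List (Int × Int × Int))) : Prop := out = group_consecutive_columns_py_alt qualifying_columns
instance (qualifying_columns : List (Int × Int × Int)) (out : List (List (Int × Int × Int))) : Decidable (Spec_group_consecutive_columns_py qualifying_columns out) := by unfold Spec_group_consecutive_columns_py; infer_instance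

-- ===== CLAIM (what is proved, stated in full; the proofs are below) =====
def Claim_equal_group_consecutive_columns_py : Prop := ∀ (qualifying_columns : List (Int × Int × Int)), Dom_group_consecutive_columns_py qualifying_columns → Spec_group_consecutive_columns_py qualifying_columns (group_consecutive_columns_py qualifying_columns)

-- ===== LEMMAS AND PROOFS =====

-- reference chunking: chunkRec a l groups a :: l by the gap rule
def chunkRec : (Int × Int × Int) → List (Int × Int × Int) → List (List (Int × Int × Int))
  | a, [] => [[a]]
  | a, b :: l =>
    if b.1 - a.1 ≤ 5 then
      match chunkRec b l with
      | g :: gs => (a :: g) :: gs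
      | [] => [[a]]
    else
      [a] :: chunkRec b l

theorem chunkRec_head (a : Int × Int × Int) (l : List (Int × Int × Int)) :
    ∃ g gs, chunkRec a l = (a :: g) :: gs := by
  induction l generalizing a with
  | nil => exact ⟨[], [], rfl⟩
  | cons b l ih =>
    obtain ⟨g, gs, hg⟩ := ih b
    by_cases h : b.1 - a.1 ≤ 5
    · exact ⟨b :: g, gs, by simp [chunkRec, h, hg]⟩
    · exact ⟨[], chunkRec b l, by simp [chunkRec, h]⟩

-- prepend cur to the first group
def consCur (cur : List (Int × Int × Int)) : List (List (Int × Int × Int)) → List (List (Int × Int × Int))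
  | [] => [cur]
  | g :: gs => (cur ++ g) :: gs

theorem portA_loop (c0 : Int × Int × Int) (l : List (Int × Int × Int))
    (gs : List (List (Int × Int × Int))) (cur : List (Int × Int × Int))
    (a : Int × Int × Int) :
    (List.foldl
      (fun (st : List (List (Int × Int × Int)) × List (Int × Int × Int)) col_data =>
        if col_data.1 - ((PySem.List.pyGet? st.2 (-1)).getD c0).1 ≤ 5 then
          (st.1, st.2 ++ [col_data])
        else
          (st.1 ++ [st.2], [col_data]))
      (gs, cur ++ [a]) l).1 ++
    [(List.foldl
      (fun (st : List (List (Int × Int × Int)) × List (Int × Int × Int)) col_data =>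
        if col_data.1 - ((PySem.List.pyGet? st.2 (-1)).getD c0).1 ≤ 5 then
          (st.1, st.2 ++ [col_data])
        else
          (st.1 ++ [st.2], [col_data]))
      (gs, cur ++ [a]) l).2] = gs ++ consCur cur (chunkRec a l) := by
  induction l generalizing gs cur a with
  | nil => simp [consCur, chunkRec]
  | cons b l ih =>
    simp only [List.foldl_cons, PySem.List.pyGet?_neg_one_append_singleton, Option.getD_some]
    obtain ⟨g, gs', hg⟩ := chunkRec_head b l
    by_cases h : b.1 - a.1 ≤ 5
    · rw [if_pos h, ih gs (cur ++ [a]) b]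
      simp [chunkRec, h, hg, consCur]
    · rw [if_neg h]
      have h0 : ([b] : List (Int × Int × Int)) = [] ++ [b] := rfl
      rw [h0, ih (gs ++ [cur ++ [a]]) [] b]
      simp [chunkRec, h, hg, consCur]

theorem portA_eq_chunkRec (a : Int × Int × Int) (l : List (Int × Int × Int)) :
    group_consecutive_columns_py (a :: l) = chunkRec a l := by
  have hloop := portA_loop a l [] [] a
  obtain ⟨g, gs, hg⟩ := chunkRec_head a l
  rw [hg] at hloop ⊢
  simpa [group_consecutive_columns_py, consCur] using hloop

theorem portB_foldr (qualifying_columns : List (Int × Int × Int)) :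
    group_consecutive_columns_py_alt qualifying_columns =
      qualifying_columns.foldr (fun col groups => pvAltStep groups col) [] := by
  simp [group_consecutive_columns_py_alt, List.foldl_reverse]

theorem portB_eq_chunkRec (a : Int × Int × Int) (l : List (Int × Int × Int)) :
    group_consecutive_columns_py_alt (a :: l) = chunkRec a l := by
  induction l generalizing a with
  | nil => rfl
  | cons b l ih =>
    obtain ⟨g, gs, hg⟩ := chunkRec_head b l
    have hB : (b :: l).foldr (fun col groups => pvAltStep groups col) [] = (b :: g) :: gs := by
      rw [← portB_foldr, ih b, hg]
    rw [portB_foldr, List.foldr_cons, hB]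
    by_cases h : b.1 - a.1 ≤ 5
    · simp [pvAltStep, h, chunkRec, hg]
    · simp [pvAltStep, h, chunkRec, hg]

-- ===== VERDICT (by name: the statement is the Claim_ definition above) =====
theorem group_consecutive_columns_py_spec : Claim_equal_group_consecutive_columns_py := by
  intro qc _
  unfold Spec_group_consecutive_columns_py
  cases qc with
  | nil => rfl
  | cons a l => rw [portA_eq_chunkRec, portB_eq_chunkRec]
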